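-- pv_equiv track=rewrite | github.com/PauMayench/rat-hypertopia-detection | functions.py | nomesrallabaix
-- ===== SOURCE A (Python) =====
-- from copy import deepcopy
--
-- def nomesrallabaix(img2):
--     img = deepcopy(img2)
--     len2 = int(len(img) / 2)
--     for y in range(len(img[0])):
--         b = False
--         for a in range(len2):
--             x = (len2) - a - 1
--             img[x][y] = 0
--
--     for y in range(len(img[0])):
--         b = False
--         for a in range(len2):
--             x = (len2) + a
--             if(not b and img[x][y] > 250):
--                 b = True
--             elif(b): img[x][y] = 0
--
--     return img
-- ===== SOURCE B (Python) =====
-- from copy import deepcopy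
--
-- def nomesrallabaix(img2):
--     img = deepcopy(img2)
--     n2 = len(img) // 2
--     for y in range(len(img[0])):
--         fb = next((x for x in range(n2, 2 * n2) if img[x][y] > 250), 2 * n2)
--         for x in range(n2):
--             img[x][y] = 0
--         for x in range(fb + 1, 2 * n2):
--             img[x][y] = 0
--     return img
-- ===== Notes on version B (the rewrite author's own statement) =====
-- stated objective: alternative
-- what changed: B replaces A's per-column running boolean flag with an explicit two-step per column: find the index of the first pixel > 250 in the lower half, then zero the upper half and the lower-half tail after that index.
import Mathlib
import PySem

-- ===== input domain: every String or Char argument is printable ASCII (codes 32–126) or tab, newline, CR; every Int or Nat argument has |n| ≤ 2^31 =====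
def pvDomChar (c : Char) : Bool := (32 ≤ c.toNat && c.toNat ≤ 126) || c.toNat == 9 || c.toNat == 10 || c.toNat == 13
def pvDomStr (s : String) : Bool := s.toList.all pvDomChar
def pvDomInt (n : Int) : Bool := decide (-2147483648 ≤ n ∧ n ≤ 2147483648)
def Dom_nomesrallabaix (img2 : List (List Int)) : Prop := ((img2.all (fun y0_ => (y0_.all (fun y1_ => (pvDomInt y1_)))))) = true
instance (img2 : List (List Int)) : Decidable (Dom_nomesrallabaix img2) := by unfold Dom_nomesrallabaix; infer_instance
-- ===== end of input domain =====

-- B replaces A's per-column running boolean flag with an explicit two-step per column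
-- (find the first bright lower-half pixel, then zero upper half and the tail after it);
-- same cost, different decomposition.

-- ===== PORT A =====
-- img[x][y] = 0 (no-op out of range; Pre_ keeps every written/read cell in range)
def pvSetZ (im : List (List Int)) (x y : Nat) : List (List Int) :=
  im.modify x (fun row => row.modify y (fun _ => 0))

-- body of 'for a in range(len2): x = len2 - a - 1; img[x][y] = 0'
def pvUpperStep (len2 y : Nat) (im : List (List Int)) (a : Nat) : List (List Int) :=
  pvSetZ im (len2 - a - 1) y

-- body of the second loop, state (img, b)
def pvLowStep (len2 y : Nat) (st : List (List Int) × Bool) (a : Nat) : List (List Int) × Bool :=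
  let x := len2 + a
  if !st.2 && decide ((250 : Int) < (st.1.getD x []).getD y 0) then (st.1, true)
  else if st.2 then (pvSetZ st.1 x y, st.2)
  else st

def nomesrallabaix (img2 : List (List Int)) : List (List Int) :=
  let len2 := img2.length / 2
  let ncols := (img2.headD []).length
  let img := (List.range ncols).foldl
    (fun im y => (List.range len2).foldl (pvUpperStep len2 y) im) img2
  (List.range ncols).foldl
    (fun im y => ((List.range len2).foldl (pvLowStep len2 y) (im, false)).1) img

-- ===== PORT B =====
-- per-column body: find first bright lower-half pixel (default 2*n2),
-- zero the upper half, then zero rows fb+1 .. 2*n2-1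
def pvColStep (n2 : Nat) (im : List (List Int)) (y : Nat) : List (List Int) :=
  let fb := ((List.range' n2 n2).find?
      (fun x => decide ((250 : Int) < (im.getD x []).getD y 0))).getD (2 * n2)
  let im1 := (List.range n2).foldl (fun im x => pvSetZ im x y) im
  (List.range' (fb + 1) (2 * n2 - (fb + 1))).foldl (fun im x => pvSetZ im x y) im1

def nomesrallabaix_alt (img2 : List (List Int)) : List (List Int) :=
  let n2 := img2.length / 2
  (List.range (img2.headD []).length).foldl (pvColStep n2) img2

-- ===== PRECONDITION & SPEC =====
-- Pre_ excludes exactly the inputs on which the Python A raises IndexError: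
-- the empty image (A evaluates img[0]) and images where some row among the
-- first 2*(len//2) rows is shorter than row 0 (A reads/writes img[x][y] there).
def Pre_nomesrallabaix (img2 : List (List Int)) : Prop :=
  img2 ≠ [] ∧ ∀ r ∈ img2.take (2 * (img2.length / 2)), (img2.headD []).length ≤ r.length
instance (img2 : List (List Int)) : Decidable (Pre_nomesrallabaix img2) := by
  unfold Pre_nomesrallabaix; infer_instance

def pvWitness_nomesrallabaix : List (List Int) := [[1, 2], [300, 4], [5, 6]]

def Spec_nomesrallabaix (img2 : List (List Int)) (out : List (List Int)) : Prop := out = nomesrallabaix_alt img2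
instance (img2 : List (List Int)) (out : List (List Int)) : Decidable (Spec_nomesrallabaix img2 out) := by unfold Spec_nomesrallabaix; infer_instance

-- ===== CLAIM (what is proved, stated in full; the proofs are below) =====
def Claim_equal_nomesrallabaix : Prop := ∀ (img2 : List (List Int)), Dom_nomesrallabaix img2 → Pre_nomesrallabaix img2 → Spec_nomesrallabaix img2 (nomesrallabaix img2)

-- ===== LEMMAS AND PROOFS =====

-- total cell read: element (i,j) of the image, 0 when out of range
def pvE (im : List (List Int)) (i j : Nat) : Int := (im.getD i []).getD j 0

theorem pv_modZ (l : List Int) (y j : Nat) :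
    (l.modify y (fun _ => 0)).getD j 0 = if j = y then 0 else l.getD j 0 := by
  by_cases h : j = y
  · subst h
    by_cases hy : j < l.length
    · simp [List.getD, hy]
    · simp [List.getD, hy]
  · simp [List.getD, Ne.symm h, h]

theorem pv_rowZ (im : List (List Int)) (x i : Nat) (f : List Int → List Int) (hf : f [] = []) :
    ((im.modify x f).getD i []) = if i = x then f (im.getD i []) else im.getD i [] := by
  by_cases h : i = x
  · subst h
    by_cases hy : i < im.length
    · simp [List.getD, hy]
    · simp [List.getD, hy, hf]
  · simp [List.getD, Ne.symm h, h]

theorem pvE_setZ (im : List (List Int)) (x y i j : Nat) :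
    pvE (pvSetZ im x y) i j = if i = x ∧ j = y then 0 else pvE im i j := by
  unfold pvE pvSetZ
  rw [pv_rowZ im x i _ (by simp)]
  by_cases h : i = x
  · simp only [h, true_and, if_true]
    exact pv_modZ _ _ _
  · simp [h]

theorem pvShape_setZ (im : List (List Int)) (x y : Nat) :
    (pvSetZ im x y).map List.length = im.map List.length := by
  apply List.ext_getElem (by simp [pvSetZ])
  intro i h1 h2
  simp [pvSetZ, List.getElem_modify]
  split <;> simp

theorem pv_if_merge {P Q : Prop} [Decidable P] [Decidable Q] (x e : Int) :
    (if P then x else if Q then x else e) = if P ∨ Q then x else e := by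
  split_ifs <;> first | rfl | tauto

theorem pv_foldl_inv {α β γ : Type} (g : α → γ) (f : α → β → α) (l : List β) (a : α)
    (h : ∀ a b, g (f a b) = g a) : g (l.foldl f a) = g a := by
  induction l generalizing a with
  | nil => rfl
  | cons b t ih => simp only [List.foldl_cons]; rw [ih, h]

theorem pvUpper_inner (len2 y : Nat) (k : Nat) (hk : k ≤ len2) (im : List (List Int)) (i j : Nat) :
    pvE ((List.range k).foldl (pvUpperStep len2 y) im) i j
      = if len2 - k ≤ i ∧ i < len2 ∧ j = y then 0 else pvE im i j := by
  induction k generalizing im with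
  | zero => simp; omega
  | succ k ih =>
    rw [List.range_succ, List.foldl_append]
    simp only [List.foldl_cons, List.foldl_nil]
    rw [show pvUpperStep len2 y ((List.range k).foldl (pvUpperStep len2 y) im) k
        = pvSetZ ((List.range k).foldl (pvUpperStep len2 y) im) (len2 - k - 1) y from rfl]
    rw [pvE_setZ, ih (by omega)]
    split_ifs <;> first | rfl | omega

theorem pvUpper_outer (len2 : Nat) (k : Nat) (im : List (List Int)) (i j : Nat) :
    pvE ((List.range k).foldl
          (fun im y => (List.range len2).foldl (pvUpperStep len2 y) im) im) i j
      = if i < len2 ∧ j < k then 0 else pvE im i j := by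
  induction k generalizing im with
  | zero => simp
  | succ k ih =>
    rw [List.range_succ, List.foldl_append]
    simp only [List.foldl_cons, List.foldl_nil]
    rw [pvUpper_inner len2 k len2 (le_refl _) _ i j, ih]
    split_ifs <;> first | rfl | omega

theorem pvLow_inner (len2 y : Nat) (k : Nat) (imS : List (List Int)) :
    (((List.range k).foldl (pvLowStep len2 y) (imS, false)).2
        = decide (∃ a, a < k ∧ (250 : Int) < pvE imS (len2 + a) y)) ∧
    (∀ i j, pvE ((List.range k).foldl (pvLowStep len2 y) (imS, false)).1 i j
        = if j = y ∧ i < len2 + k ∧ (∃ a < i, len2 + a < i ∧ (250 : Int) < pvE imS (len2 + a) y)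
          then 0 else pvE imS i j) := by
  induction k with
  | zero =>
    refine ⟨by simp, ?_⟩
    intro i j; simp only [List.range_zero, List.foldl_nil]
    rw [if_neg]; rintro ⟨_, h2, _⟩; omega
  | succ k ih =>
    obtain ⟨ihb, ihe⟩ := ih
    rw [List.range_succ, List.foldl_append]
    simp only [List.foldl_cons, List.foldl_nil]
    set st := (List.range k).foldl (pvLowStep len2 y) (imS, false) with hst
    have hread : (st.1.getD (len2 + k) []).getD y 0 = pvE imS (len2 + k) y := by
      have h := ihe (len2 + k) y
      rw [show pvE st.1 (len2 + k) y = (st.1.getD (len2 + k) []).getD y 0 from rfl] at h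
      rw [h, if_neg]; rintro ⟨_, h2, _⟩; omega
    by_cases hb : st.2 = true
    · have hbE : ∃ a, a < k ∧ (250 : Int) < pvE imS (len2 + a) y := by
        rw [ihb] at hb; exact of_decide_eq_true hb
      obtain ⟨a0, ha0, hp0⟩ := hbE
      have hstep : pvLowStep len2 y st k = (pvSetZ st.1 (len2 + k) y, st.2) := by
        simp [pvLowStep, hb]
      rw [hstep]
      refine ⟨?_, ?_⟩
      · simp only [hb]; symm; simp only [decide_eq_true_eq]
        exact ⟨a0, by omega, hp0⟩
      · intro i j
        simp only
        rw [pvE_setZ, ihe i j, pv_if_merge]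
        refine if_congr ?_ rfl rfl
        constructor
        · rintro (⟨hi, hj⟩ | ⟨hj, hik, a, ha, hla, hp'⟩)
          · exact ⟨hj, by omega, a0, by omega, by omega, hp0⟩
          · exact ⟨hj, by omega, a, ha, hla, hp'⟩
        · rintro ⟨hj, hik, a, ha, hla, hp'⟩
          rcases Nat.lt_or_ge i (len2 + k) with hlt | hge
          · right; exact ⟨hj, hlt, a, ha, hla, hp'⟩
          · left; exact ⟨by omega, hj⟩
    · have hb' : st.2 = false := by simpa using hb
      have hnE : ¬ ∃ a, a < k ∧ (250 : Int) < pvE imS (len2 + a) y := by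
        rw [ihb] at hb'; simpa using hb'
      by_cases hp : (250 : Int) < pvE imS (len2 + k) y
      · have hc : (!st.2 && decide ((250 : Int) < (st.1.getD (len2 + k) []).getD y 0)) = true := by
          rw [hb', hread]; simp [hp]
        have hstep : pvLowStep len2 y st k = (st.1, true) := by
          simp only [pvLowStep]; rw [if_pos hc]
        rw [hstep]
        refine ⟨?_, ?_⟩
        · symm; simp only [decide_eq_true_eq]; exact ⟨k, by omega, hp⟩
        · intro i j
          simp only
          rw [ihe i j]
          refine if_congr ?_ rfl rfl
          constructor
          · rintro ⟨hj, hik, a, ha, hla, hp'⟩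
            exact ⟨hj, by omega, a, ha, hla, hp'⟩
          · rintro ⟨hj, hik, a, ha, hla, hp'⟩
            rcases Nat.lt_or_ge a k with h5 | h6
            · exact absurd ⟨a, h5, hp'⟩ hnE
            · exact absurd hla (by omega)
      · have hc : (!st.2 && decide ((250 : Int) < (st.1.getD (len2 + k) []).getD y 0)) = false := by
          rw [hb', hread]; simp [hp]
        have hstep : pvLowStep len2 y st k = st := by
          simp only [pvLowStep]
          rw [if_neg (by rw [hc]; exact Bool.false_ne_true),
              if_neg (by rw [hb']; exact Bool.false_ne_true)]
        rw [hstep]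
        refine ⟨?_, ?_⟩
        · rw [ihb]
          simp only [decide_eq_decide]
          constructor
          · rintro ⟨a, ha, h⟩; exact ⟨a, by omega, h⟩
          · rintro ⟨a, ha, h⟩
            rcases Nat.lt_or_ge a k with h5 | h6
            · exact ⟨a, h5, h⟩
            · have ha' : a = k := by omega
              subst ha'; exact absurd h hp
        · intro i j
          rw [ihe i j]
          refine if_congr ?_ rfl rfl
          constructor
          · rintro ⟨hj, hik, a, ha, hla, hp'⟩
            exact ⟨hj, by omega, a, ha, hla, hp'⟩
          · rintro ⟨hj, hik, a, ha, hla, hp'⟩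
            rcases Nat.lt_or_ge a k with h5 | h6
            · exact absurd ⟨a, h5, hp'⟩ hnE
            · have ha' : a = k := by omega
              subst ha'; exact absurd hp' hp

theorem pvLow_outer (len2 : Nat) (k : Nat) (im : List (List Int)) (i j : Nat) :
    pvE ((List.range k).foldl
          (fun im y => ((List.range len2).foldl (pvLowStep len2 y) (im, false)).1) im) i j
      = if j < k ∧ i < len2 + len2 ∧ (∃ a < i, len2 + a < i ∧ (250 : Int) < pvE im (len2 + a) j)
        then 0 else pvE im i j := by
  induction k generalizing im i j with
  | zero => simp only [List.range_zero, List.foldl_nil]; rw [if_neg]; rintro ⟨h, _⟩; omega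
  | succ k ih =>
    rw [List.range_succ, List.foldl_append]
    simp only [List.foldl_cons, List.foldl_nil]
    set imk := (List.range k).foldl
      (fun im y => ((List.range len2).foldl (pvLowStep len2 y) (im, false)).1) im with himk
    have hcolk : ∀ a, pvE imk (len2 + a) k = pvE im (len2 + a) k := by
      intro a; rw [ih]; rw [if_neg]; rintro ⟨h, _⟩; omega
    rw [(pvLow_inner len2 k len2 imk).2 i j]
    simp only [hcolk]
    rw [ih im i j, pv_if_merge]
    refine if_congr ?_ rfl rfl
    constructor
    · rintro (⟨hj, hik, hex⟩ | ⟨hj, hik, hex⟩)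
      · subst hj; exact ⟨by omega, hik, hex⟩
      · exact ⟨by omega, hik, hex⟩
    · rintro ⟨hj, hik, hex⟩
      rcases Nat.lt_or_ge j k with hlt | hge
      · right; exact ⟨hlt, hik, hex⟩
      · have hjk : j = k := by omega
        subst hjk; left; exact ⟨rfl, hik, hex⟩

theorem pvA_char (img2 : List (List Int)) (i j : Nat) :
    pvE (nomesrallabaix img2) i j
      = if j < (img2.headD []).length ∧
          (i < img2.length / 2 ∨
            (i < 2 * (img2.length / 2) ∧
              ∃ a < i, img2.length / 2 + a < i ∧ (250 : Int) < pvE img2 (img2.length / 2 + a) j))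
        then 0 else pvE img2 i j := by
  unfold nomesrallabaix
  simp only
  set len2 := img2.length / 2
  set nc := (img2.headD []).length
  set im1 := (List.range nc).foldl
    (fun im y => (List.range len2).foldl (pvUpperStep len2 y) im) img2 with him1
  have hlow : ∀ a j', pvE im1 (len2 + a) j' = pvE img2 (len2 + a) j' := by
    intro a j'; rw [him1, pvUpper_outer]; rw [if_neg]; rintro ⟨h, _⟩; omega
  rw [pvLow_outer len2 nc im1 i j]
  simp only [hlow]
  rw [him1, pvUpper_outer, pv_if_merge]
  refine if_congr ?_ rfl rfl
  constructor
  · rintro (⟨hj, hik, hex⟩ | ⟨hi, hj⟩)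
    · exact ⟨hj, Or.inr ⟨by omega, hex⟩⟩
    · exact ⟨hj, Or.inl hi⟩
  · rintro ⟨hj, hi | ⟨hik, hex⟩⟩
    · right; exact ⟨hi, hj⟩
    · left; exact ⟨hj, by omega, hex⟩

theorem pvA_shape (img2 : List (List Int)) :
    (nomesrallabaix img2).map List.length = img2.map List.length := by
  unfold nomesrallabaix
  simp only
  set len2 := img2.length / 2
  have hset : ∀ (im : List (List Int)) (x y : Nat),
      (pvSetZ im x y).map List.length = im.map List.length := pvShape_setZ
  have hup : ∀ (im : List (List Int)) (y : Nat),
      ((List.range len2).foldl (pvUpperStep len2 y) im).map List.length = im.map List.length := by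
    intro im y
    exact pv_foldl_inv (fun im => im.map List.length) _ _ _ (fun a b => hset a _ _)
  have hlowstep : ∀ (y : Nat) (st : List (List Int) × Bool) (a : Nat),
      (pvLowStep len2 y st a).1.map List.length = st.1.map List.length := by
    intro y st a
    simp only [pvLowStep]
    split
    · rfl
    · split
      · exact hset _ _ _
      · rfl
  have hlo : ∀ (im : List (List Int)) (y : Nat),
      ((List.range len2).foldl (pvLowStep len2 y) (im, false)).1.map List.length
        = im.map List.length := by
    intro im y
    exact pv_foldl_inv (fun st => st.1.map List.length) _ _ _ (fun a b => hlowstep y a b)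
  rw [pv_foldl_inv (fun im => im.map List.length) _ _ _ (fun a b => hlo a b)]
  exact pv_foldl_inv (fun im => im.map List.length) _ _ _ (fun a b => hup a b)

theorem pvFind_range' (s n i : Nat) (h : i ≤ s + n) (p : Nat → Bool) :
    (((List.range' s n).find? p).getD (s + n) < i) ↔ (∃ x, s ≤ x ∧ x < i ∧ p x = true) := by
  induction n generalizing s i with
  | zero => simp; omega
  | succ n ih =>
    rw [List.range'_succ, List.find?_cons]
    by_cases hp : p s
    · simp [hp]
      constructor
      · intro hsi; exact ⟨s, le_refl s, hsi, hp⟩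
      · rintro ⟨x, hx1, hx2, _⟩; omega
    · simp [hp]
      rw [show s + (n + 1) = (s + 1) + n by omega]
      rw [ih (s + 1) i (by omega)]
      constructor
      · rintro ⟨x, h1, h2, h3⟩; exact ⟨x, by omega, h2, h3⟩
      · rintro ⟨x, h1, h2, h3⟩
        refine ⟨x, ?_, h2, h3⟩
        rcases Nat.eq_or_lt_of_le h1 with he | hl
        · exfalso; rw [← he] at h3; simp [hp] at h3
        · omega

theorem pvFind_le (s n d : Nat) (hd : s + n ≤ d) (p : Nat → Bool) :
    ((List.range' s n).find? p).getD d ≤ d := by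
  cases hf : (List.range' s n).find? p with
  | none => simp
  | some x =>
    have hm := List.mem_of_find?_eq_some hf
    rw [List.mem_range'_1] at hm
    simp only [Option.getD_some]
    omega

theorem pvZeroCol (y : Nat) (s n : Nat) (im : List (List Int)) (i j : Nat) :
    pvE ((List.range' s n).foldl (fun im x => pvSetZ im x y) im) i j
      = if j = y ∧ s ≤ i ∧ i < s + n then 0 else pvE im i j := by
  induction n generalizing s im with
  | zero => simp only [List.range'_zero, List.foldl_nil]; rw [if_neg]; omega
  | succ n ih =>
    rw [List.range'_succ]
    simp only [List.foldl_cons]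
    rw [ih (s + 1) (pvSetZ im s y), pvE_setZ]
    split_ifs <;> first | rfl | omega

theorem pvColStep_char (n2 y : Nat) (im : List (List Int)) (i j : Nat) :
    pvE (pvColStep n2 im y) i j
      = if j = y ∧ (i < n2 ∨ (i < 2 * n2 ∧
            ∃ a < i, n2 + a < i ∧ (250 : Int) < pvE im (n2 + a) y))
        then 0 else pvE im i j := by
  unfold pvColStep
  simp only
  set fb := ((List.range' n2 n2).find?
      (fun x => decide ((250 : Int) < (im.getD x []).getD y 0))).getD (2 * n2) with hfb
  have hfble : fb ≤ 2 * n2 := pvFind_le n2 n2 (2 * n2) (by omega) _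
  rw [pvZeroCol, List.range_eq_range', pvZeroCol, pv_if_merge]
  refine if_congr ?_ rfl rfl
  constructor
  · rintro (⟨hj, h1, h2⟩ | ⟨hj, _, h2⟩)
    · refine ⟨hj, Or.inr ⟨by omega, ?_⟩⟩
      have hfi : fb < i := by omega
      have hi2 : i ≤ n2 + n2 := by omega
      have := (pvFind_range' n2 n2 i hi2 _).mp (by rw [show n2 + n2 = 2 * n2 by omega]; exact hfi)
      obtain ⟨x, hx1, hx2, hx3⟩ := this
      refine ⟨x - n2, by omega, by omega, ?_⟩
      have hxe : n2 + (x - n2) = x := by omega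
      rw [hxe]
      exact of_decide_eq_true hx3
    · exact ⟨hj, Or.inl (by omega)⟩
  · rintro ⟨hj, hi | ⟨hi2, a, ha, hla, hp⟩⟩
    · right; exact ⟨hj, by omega, by omega⟩
    · left
      refine ⟨hj, ?_, ?_⟩
      · have hfi : fb < i := by
          have hi2' : i ≤ n2 + n2 := by omega
          have := (pvFind_range' n2 n2 i hi2'
              (fun x => decide ((250 : Int) < (im.getD x []).getD y 0))).mpr
            ⟨n2 + a, by omega, hla,
              decide_eq_true (show (250 : Int) < ((im.getD (n2 + a) []).getD y 0) from hp)⟩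
          rw [show n2 + n2 = 2 * n2 by omega] at this
          exact this
        omega
      · omega

theorem pvB_outer (n2 k : Nat) (im : List (List Int)) (i j : Nat) :
    pvE ((List.range k).foldl (pvColStep n2) im) i j
      = if j < k ∧ (i < n2 ∨ (i < 2 * n2 ∧
            ∃ a < i, n2 + a < i ∧ (250 : Int) < pvE im (n2 + a) j))
        then 0 else pvE im i j := by
  induction k generalizing im i j with
  | zero =>
    simp only [List.range_zero, List.foldl_nil]
    rw [if_neg]; rintro ⟨h, _⟩; omega
  | succ k ih =>
    rw [List.range_succ, List.foldl_append]
    simp only [List.foldl_cons, List.foldl_nil]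
    set imk := (List.range k).foldl (pvColStep n2) im with himk
    have hcolk : ∀ a, pvE imk (n2 + a) k = pvE im (n2 + a) k := by
      intro a; rw [himk, ih]; rw [if_neg]; rintro ⟨h, _⟩; omega
    rw [pvColStep_char n2 k imk i j]
    simp only [hcolk]
    rw [ih, pv_if_merge]
    refine if_congr ?_ rfl rfl
    constructor
    · rintro (⟨hj, hc⟩ | ⟨hj, hc⟩)
      · subst hj; exact ⟨by omega, hc⟩
      · exact ⟨by omega, hc⟩
    · rintro ⟨hj, hc⟩
      rcases Nat.lt_or_ge j k with hlt | hge
      · right; exact ⟨hlt, hc⟩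
      · left
        have hjk : j = k := by omega
        subst hjk
        exact ⟨rfl, hc⟩

theorem pvB_char (img2 : List (List Int)) (i j : Nat) :
    pvE (nomesrallabaix_alt img2) i j
      = if j < (img2.headD []).length ∧
          (i < img2.length / 2 ∨
            (i < 2 * (img2.length / 2) ∧
              ∃ a < i, img2.length / 2 + a < i ∧ (250 : Int) < pvE img2 (img2.length / 2 + a) j))
        then 0 else pvE img2 i j := by
  unfold nomesrallabaix_alt
  simp only
  exact pvB_outer (img2.length / 2) (img2.headD []).length img2 i j

theorem pvB_shape (img2 : List (List Int)) :
    (nomesrallabaix_alt img2).map List.length = img2.map List.length := by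
  unfold nomesrallabaix_alt
  simp only
  have hz : ∀ (y : Nat) (l : List Nat) (im : List (List Int)),
      (l.foldl (fun im x => pvSetZ im x y) im).map List.length = im.map List.length := by
    intro y l im
    exact pv_foldl_inv (fun im => im.map List.length) _ _ _ (fun a b => pvShape_setZ a _ _)
  have hcol : ∀ (im : List (List Int)) (y : Nat),
      (pvColStep (img2.length / 2) im y).map List.length = im.map List.length := by
    intro im y
    unfold pvColStep
    simp only
    rw [hz, hz]
  exact pv_foldl_inv (fun im => im.map List.length) _ _ _ (fun a b => hcol a b)

theorem pv_ext (A B : List (List Int))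
    (hs : A.map List.length = B.map List.length)
    (he : ∀ i j, pvE A i j = pvE B i j) : A = B := by
  have hlen : A.length = B.length := by
    have := congrArg List.length hs; simpa using this
  apply List.ext_getElem hlen
  intro i h1 h2
  have hrow : (A[i]).length = (B[i]).length := by
    have := congrArg (fun l => l.getD i 0) hs
    simpa [List.getD, List.getElem?_map, h1, h2, List.getElem?_eq_getElem] using this
  apply List.ext_getElem hrow
  intro j j1 j2
  have := he i j
  simpa [pvE, List.getD, List.getElem?_eq_getElem, h1, h2, j1, j2] using this

-- ===== VERDICT (by name: the statement is the Claim_ definition above) =====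
theorem nomesrallabaix_spec : Claim_equal_nomesrallabaix := by
  intro img2 _ _
  unfold Spec_nomesrallabaix
  refine pv_ext _ _ ?_ ?_
  · rw [pvA_shape, pvB_shape]
  · intro i j; rw [pvA_char, pvB_char]
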